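-- pv_equiv track=rewrite | github.com/kristan-dev/codility_answers | sample_test.py | solution_two
-- ===== SOURCE A (Python) =====
-- def solution_two(A):
--     '''Returns a string of length N consisting of alternating characters: "+" and "-", starting with a "+" character. You can assume N is between 1 and 100.'''
--     result = ""
--
--     for i in range(0, A, 1):
--         if((i%2) == 0):
--             result = result+"+"
--         else:
--             result = result+"-"
--
--     return result
-- ===== SOURCE B (Python) =====
-- def solution_two(A):
--     '''Returns a string of length N consisting of alternating characters: "+" and "-", starting with a "+" character. You can assume N is between 1 and 100.'''
--     return ("+-" * ((A + 1) // 2))[:A]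
-- ===== Notes on version B (the rewrite author's own statement) =====
-- stated objective: faster
-- what changed: Replaces the index loop with its parity branch and quadratic character-by-character concatenation by a closed-form construction: repeat the unit "+-" ceil(A/2) times in one C-level operation and slice to the first A characters.
import Mathlib
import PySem

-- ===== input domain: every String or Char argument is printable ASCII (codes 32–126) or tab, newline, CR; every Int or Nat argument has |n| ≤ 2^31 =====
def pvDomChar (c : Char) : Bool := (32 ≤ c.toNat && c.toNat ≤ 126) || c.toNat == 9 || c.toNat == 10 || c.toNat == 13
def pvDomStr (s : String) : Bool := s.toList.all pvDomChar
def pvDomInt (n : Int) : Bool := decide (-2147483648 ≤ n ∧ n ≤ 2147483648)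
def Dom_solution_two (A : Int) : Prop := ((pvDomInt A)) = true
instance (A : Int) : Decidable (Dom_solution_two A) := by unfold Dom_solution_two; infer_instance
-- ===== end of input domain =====

-- B replaces A's index loop (parity branch, char-by-char concatenation) by a closed-form
-- construction: repeat "+-" ceil(A/2) times and slice to the first A characters.

-- ===== PORT A =====
-- for i in range(0, A, 1): result += "+" if i % 2 == 0 else "-"
def solution_two (A : Int) : String :=
  String.ofList ((PySem.List.pyRange 0 A 1).foldl
    (fun result i => if PySem.Int.mod i 2 == 0 then result ++ ['+'] else result ++ ['-']) [])

-- ===== PORT B =====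
-- ("+-" * ((A + 1) // 2))[:A]
def solution_two_alt (A : Int) : String :=
  String.ofList (PySem.List.slice (PySem.List.pyRepeat ['+', '-'] (PySem.Int.floordiv (A + 1) 2)) none (some A))

-- ===== PRECONDITION & SPEC =====
def Spec_solution_two (A : Int) (out : String) : Prop := out = solution_two_alt A
instance (A : Int) (out : String) : Decidable (Spec_solution_two A out) := by unfold Spec_solution_two; infer_instance

-- ===== CLAIM (what is proved, stated in full; the proofs are below) =====
def Claim_equal_solution_two : Prop := ∀ (A : Int), Dom_solution_two A → Spec_solution_two A (solution_two A)

-- ===== LEMMAS AND PROOFS =====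

def pvF (k : Nat) : Char := if k % 2 = 0 then '+' else '-'

theorem pvLoop_eq_map (n : Nat) :
    (PySem.List.pyRange 0 (n : Int) 1).foldl
      (fun result i => if PySem.Int.mod i 2 == 0 then result ++ ['+'] else result ++ ['-']) []
    = (List.range n).map pvF := by
  induction n with
  | zero => simp [PySem.List.pyRange_one_eq_nil]
  | succ m ih =>
    rw [show ((m + 1 : Nat) : Int) = (m : Int) + 1 by push_cast; ring,
      PySem.List.pyRange_one_succ_right (by exact_mod_cast Nat.zero_le m),
      List.foldl_append, List.range_succ, List.map_append, ih]
    simp only [List.foldl_cons, List.foldl_nil, List.map_cons, List.map_nil, pvF]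
    have hmod : PySem.Int.mod (m : Int) 2 = ((m % 2 : Nat) : Int) := by
      rw [PySem.Int.mod_eq_emod_of_pos (by norm_num : (0:Int) < 2)]; omega
    rcases Nat.mod_two_eq_zero_or_one m with h | h <;> rw [hmod, h] <;> simp <;> omega

theorem pvFlatten_replicate (m : Nat) :
    (List.replicate m ['+', '-']).flatten = (List.range (2 * m)).map pvF := by
  induction m with
  | zero => simp
  | succ k ih =>
    have h2 : 2 * (k + 1) = (2 * k + 1) + 1 := by ring
    have hmap : ∀ g : Nat → Nat, (∀ x, g x = x + 2) →
        (List.range (2 * k)).map (pvF ∘ g) = (List.range (2 * k)).map pvF := by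
      intro g hg
      apply List.map_congr_left
      intro x _
      have h2' : g x % 2 = x % 2 := by rw [hg]; omega
      simp [pvF, h2']
    rw [List.replicate_succ, List.flatten_cons, ih, h2,
      List.range_succ_eq_map, List.range_succ_eq_map]
    simp only [List.map_cons, List.map_map]
    rw [hmap (Nat.succ ∘ Nat.succ) (fun x => rfl)]
    simp [pvF]

-- ===== VERDICT (by name: the statement is the Claim_ definition above) =====
theorem solution_two_spec : Claim_equal_solution_two := by
  intro A _
  unfold Spec_solution_two solution_two solution_two_alt
  rcases Int.lt_or_le A 0 with hA | hA
  · rw [PySem.List.pyRange_one_eq_nil (by omega)]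
    have hrep : PySem.List.pyRepeat ['+', '-'] (PySem.Int.floordiv (A + 1) 2) = ([] : List Char) := by
      have h0 : (PySem.Int.floordiv (A + 1) 2).toNat = 0 := by
        rw [PySem.Int.floordiv_eq_ediv_of_pos (by norm_num : (0:Int) < 2)]; omega
      unfold PySem.List.pyRepeat; rw [h0]; rfl
    rw [hrep]
    simp [PySem.List.slice]
  · obtain ⟨n, rfl⟩ := Int.eq_ofNat_of_zero_le hA
    rw [pvLoop_eq_map]
    have hdiv : (PySem.Int.floordiv ((n : Int) + 1) 2).toNat = (n + 1) / 2 := by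
      rw [PySem.Int.floordiv_eq_ediv_of_pos (by norm_num : (0:Int) < 2)]; omega
    rw [PySem.List.pyRepeat, hdiv, pvFlatten_replicate, PySem.List.slice_to_natCast,
      ← List.map_take, List.take_range]
    have hmin : min n (2 * ((n + 1) / 2)) = n := by omega
    rw [hmin]
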